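-- pv_equiv track=rewrite | github.com/k-harada/AtCoder | ABC/ABC237/C.py | solve
-- ===== SOURCE A (Python) =====
-- def solve(s):
--     n = len(s)
--     left_a = 0
--     right_a = 0
--     for i in range(n):
--         if s[i] == "a":
--             left_a += 1
--         else:
--             break
--     for i in range(n - 1, -1, -1):
--         if s[i] == "a":
--             right_a += 1
--         else:
--             break
--     # ALL a
--     if left_a == n:
--         return "Yes"
--     if left_a > right_a:
--         return "No"
--     t = ["a"] * (right_a - left_a) + list(s)
--     m = len(t)
--     for i in range(m):
--         if t[i] != t[m - 1 - i]:
--             return "No"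
--     return "Yes"
-- ===== SOURCE B (Python) =====
-- def solve(s):
--     core = s.strip('a')
--     left_a = len(s) - len(s.lstrip('a'))
--     right_a = len(s) - len(s.rstrip('a'))
--     if left_a > right_a:
--         return "No"
--     return "Yes" if core == core[::-1] else "No"
-- ===== Notes on version B (the rewrite author's own statement) =====
-- stated objective: faster
-- what changed: B never builds the left-padded candidate list and runs no per-character Python loops: it strips the boundary runs with str.strip/lstrip/rstrip and palindrome-tests the stripped core by slicing, after the single count comparison left_a <= right_a.
import Mathlib
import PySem

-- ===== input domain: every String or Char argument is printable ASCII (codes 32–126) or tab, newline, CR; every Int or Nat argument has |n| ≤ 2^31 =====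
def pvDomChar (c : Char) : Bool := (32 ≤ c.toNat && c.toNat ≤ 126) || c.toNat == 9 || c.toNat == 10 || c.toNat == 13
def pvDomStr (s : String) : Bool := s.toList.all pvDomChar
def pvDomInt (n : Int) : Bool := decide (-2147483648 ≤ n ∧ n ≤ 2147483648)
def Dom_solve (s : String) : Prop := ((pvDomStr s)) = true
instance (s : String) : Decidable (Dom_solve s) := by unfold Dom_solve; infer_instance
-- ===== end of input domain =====

-- B avoids building A's padded candidate list and instead palindrome-tests the stripped core
-- directly; the equivalence proved below is exact on all inputs (Dom only).

-- ===== PORT A =====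
-- leading run of 'a' (transliterates A's break-loop; applied to the reverse for the backward loop)
def countA : List Char → Nat
  | [] => 0
  | c :: rest => if c == 'a' then 1 + countA rest else 0

-- the final loop of A: for i in range(m): if t[i] != t[m-1-i]: return "No"; then "Yes"
-- (indices are always in range in A, so getD with a dummy default is exact)
def palChk (t : List Char) (m i : Nat) : String :=
  if _h : i < m then
    if t.getD i ' ' ≠ t.getD (m - 1 - i) ' ' then "No" else palChk t m (i + 1)
  else "Yes"
termination_by m - i

def solve (s : String) : String :=
  let l := s.toList
  let n := l.length
  let left_a := countA l
  let right_a := countA l.reverse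
  if left_a = n then "Yes"
  else if right_a < left_a then "No"
  else
    let t := List.replicate (right_a - left_a) 'a' ++ l
    palChk t t.length 0

-- ===== PORT B =====
-- s.lstrip('a') / s.rstrip('a') ported by hand (exact): drop the run of 'a' from the given side
def lstripA (l : List Char) : List Char := l.dropWhile (fun c => c == 'a')
def rstripA (l : List Char) : List Char := (l.reverse.dropWhile (fun c => c == 'a')).reverse

def solve_alt (s : String) : String :=
  let l := s.toList
  let core := PySem.Chars.stripChars l ['a']
  let left_a := l.length - (lstripA l).length
  let right_a := l.length - (rstripA l).length
  if right_a < left_a then "No"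
  else if core = core.reverse then "Yes" else "No"

-- ===== PRECONDITION & SPEC =====
def Spec_solve (s : String) (out : String) : Prop := out = solve_alt s
instance (s : String) (out : String) : Decidable (Spec_solve s out) := by unfold Spec_solve; infer_instance

-- ===== CLAIM (what is proved, stated in full; the proofs are below) =====
def Claim_equal_solve : Prop := ∀ (s : String), Dom_solve s → Spec_solve s (solve s)

-- ===== LEMMAS AND PROOFS =====

theorem countA_eq_takeWhile (l : List Char) :
    countA l = (l.takeWhile (fun c => c == 'a')).length := by
  induction l with
  | nil => rfl
  | cons c rest ih =>
    by_cases h : c = 'a'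
    · simp [countA, h, ih]; omega
    · simp [countA, h]

theorem takeWhile_a_replicate (l : List Char) :
    l.takeWhile (fun c => c == 'a')
      = List.replicate (l.takeWhile (fun c => c == 'a')).length 'a' := by
  apply List.eq_replicate_of_mem
  intro b hb
  have := List.mem_takeWhile_imp hb
  simpa using this

theorem tw_append_of_exists {p : Char → Bool} {x : List Char} (y : List Char)
    (h : ∃ a ∈ x, ¬ p a) : (x ++ y).takeWhile p = x.takeWhile p := by
  induction x with
  | nil => simp at h
  | cons c rest ih =>
    by_cases hc : p c
    · simp only [List.cons_append, List.takeWhile_cons, hc]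
      obtain ⟨a, ha, hpa⟩ := h
      rcases List.mem_cons.mp ha with rfl | ha'
      · exact absurd hc hpa
      · simp [ih ⟨a, ha', hpa⟩]
    · simp [hc]

theorem head_dropWhile_false {p : Char → Bool} :
    ∀ (l : List Char) (c : Char) (rest : List Char),
      l.dropWhile p = c :: rest → p c = false := by
  intro l
  induction l with
  | nil => intro c rest h; simp at h
  | cons d tl ih =>
    intro c rest h
    by_cases hd : p d
    · simp only [List.dropWhile_cons, hd, if_true] at h
      exact ih c rest h
    · simp only [List.dropWhile_cons, hd] at h
      cases h; simpa using hd

theorem palChk_yes_iff (t : List Char) (m : Nat) :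
    ∀ i, (palChk t m i = "Yes" ↔ ∀ j, i ≤ j → j < m → t.getD j ' ' = t.getD (m - 1 - j) ' ') := by
  intro i
  induction hk : m - i using Nat.strong_induction_on generalizing i with
  | _ k ih =>
    unfold palChk
    by_cases h : i < m
    · rw [dif_pos h]
      by_cases hne : t.getD i ' ' ≠ t.getD (m - 1 - i) ' '
      · rw [if_pos hne]
        constructor
        · intro hno; exact absurd hno (by decide)
        · intro hall; exact absurd (hall i le_rfl h) hne
      · rw [if_neg hne]
        rw [not_ne_iff] at hne
        have hrec := ih (m - (i + 1)) (by omega) (i + 1) rfl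
        rw [hrec]
        constructor
        · intro hall j hij hjm
          rcases Nat.eq_or_lt_of_le hij with rfl | hlt
          · exact hne
          · exact hall j hlt hjm
        · intro hall j hij hjm; exact hall j (by omega) hjm
    · rw [dif_neg h]
      constructor
      · intro _ j hij hjm; omega
      · intro _; rfl

theorem palChk_eq_if (t : List Char) :
    palChk t t.length 0 = if t = t.reverse then "Yes" else "No" := by
  have hiff : palChk t t.length 0 = "Yes" ↔ t = t.reverse := by
    rw [palChk_yes_iff]
    constructor
    · intro hall
      apply List.ext_getElem (by simp)
      intro j hj hj'
      have := hall j (Nat.zero_le _) hj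
      rw [List.getElem_reverse]
      rw [List.getD_eq_getElem t ' ' hj, List.getD_eq_getElem t ' ' (by omega)] at this
      exact this
    · intro hpal j _ hj
      have hj2 : t.length - 1 - j < t.length := by omega
      rw [List.getD_eq_getElem t ' ' hj, List.getD_eq_getElem t ' ' hj2]
      have h1 : t[j]? = t.reverse[j]? := by conv_lhs => rw [hpal]
      rw [List.getElem?_eq_getElem hj, List.getElem?_eq_getElem (by simpa using hj)] at h1
      have h2 := Option.some.inj h1
      simp only [List.getElem_reverse] at h2
      exact h2
  have hcases : palChk t t.length 0 = "Yes" ∨ palChk t t.length 0 = "No" := by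
    generalize 0 = i
    induction hk : t.length - i using Nat.strong_induction_on generalizing i with
    | _ k ih =>
      unfold palChk
      by_cases h : i < t.length
      · rw [dif_pos h]
        by_cases hne : t.getD i ' ' ≠ t.getD (t.length - 1 - i) ' '
        · rw [if_pos hne]; right; rfl
        · rw [if_neg hne]
          exact ih (t.length - (i + 1)) (by omega) (i + 1) rfl
      · rw [dif_neg h]; left; rfl
  by_cases hp : t = t.reverse
  · rw [if_pos hp]; exact hiff.mpr hp
  · rcases hcases with hy | hn
    · exact absurd (hiff.mp hy) hp
    · rw [if_neg hp]; exact hn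

theorem solve_eq (s : String) : solve s = solve_alt s := by
  have hpred : (fun c : Char => (['a'].contains c)) = (fun c : Char => c == 'a') := by
    funext c
    by_cases h : c = 'a'
    · subst h; rfl
    · simp [h]
  simp only [solve, solve_alt, lstripA, rstripA, PySem.Chars.stripChars, hpred]
  generalize s.toList = l
  have hsplit : List.takeWhile (fun c => c == 'a') l ++ (List.dropWhile (fun c => c == 'a') l) = l := List.takeWhile_append_dropWhile
  have hlen : (List.takeWhile (fun c => c == 'a') l).length + (List.dropWhile (fun c => c == 'a') l).length = l.length := by
    have h := congrArg List.length hsplit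
    rw [List.length_append] at h
    exact h
  have hla : countA l = (List.takeWhile (fun c => c == 'a') l).length := countA_eq_takeWhile l
  have hraw : countA l.reverse = (List.takeWhile (fun c => c == 'a') l.reverse).length := countA_eq_takeWhile _
  have hlen2 : (List.takeWhile (fun c => c == 'a') l.reverse).length
      + (List.dropWhile (fun c => c == 'a') l.reverse).length = l.length := by
    have h := congrArg List.length
      (List.takeWhile_append_dropWhile (p := (fun c => c == 'a')) (l := l.reverse))
    rw [List.length_append, List.length_reverse] at h
    exact h
  by_cases hall : countA l = l.length
  · -- all characters are 'a': both sides give "Yes"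
    have htwl : List.takeWhile (fun c => c == 'a') l = l :=
      (List.takeWhile_prefix _).eq_of_length (by omega)
    have hdnil : (List.dropWhile (fun c => c == 'a') l) = [] := by
      have hc := congrArg List.length htwl
      exact List.eq_nil_of_length_eq_zero (by omega)
    have hlrep : l = List.replicate l.length 'a' := by
      conv_lhs => rw [← htwl]
      rw [takeWhile_a_replicate]
      congr 1
      omega
    have hrevd : List.dropWhile (fun c => c == 'a') l.reverse = [] := by
      rw [List.dropWhile_eq_nil_iff]
      intro x hx
      have hxl : x ∈ l := List.mem_reverse.mp hx
      rw [hlrep] at hxl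
      have hxa := List.eq_of_mem_replicate hxl
      simp [hxa]
    rw [if_pos hall, hdnil, hrevd]
    norm_num
  · -- there is a non-'a' character
    rw [if_neg hall]
    rw [show l.length - (List.dropWhile (fun c => c == 'a') l).length = countA l from by omega]
    rw [show l.length - ((List.dropWhile (fun c => c == 'a') l.reverse).reverse).length = countA l.reverse from by
      rw [List.length_reverse]; omega]
    by_cases hlt : countA l.reverse < countA l
    · rw [if_pos hlt, if_pos hlt]
    · rw [if_neg hlt, if_neg hlt]
      generalize hA : countA l = la at hla hall hlt ⊢
      generalize hB : countA l.reverse = ra at hraw hlt ⊢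
      have hdne : (List.dropWhile (fun c => c == 'a') l) ≠ [] := by
        intro h0
        apply hall
        rw [hla]
        rw [h0] at hlen
        simp at hlen
        omega
      obtain ⟨c, rest, hcr⟩ := List.exists_cons_of_ne_nil hdne
      have hpc : ((fun c => c == 'a') c) = false := head_dropWhile_false l c rest hcr
      have hmem : ∃ a ∈ (List.dropWhile (fun c => c == 'a') l).reverse, ¬ ((fun c => c == 'a') a) := ⟨c, by simp [hcr], by simp [hpc]⟩
      have htwrev : List.takeWhile (fun c => c == 'a') l.reverse = List.takeWhile (fun c => c == 'a') (List.dropWhile (fun c => c == 'a') l).reverse := by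
        have hlrev : l.reverse = (List.dropWhile (fun c => c == 'a') l).reverse ++ (List.takeWhile (fun c => c == 'a') l).reverse := by
          rw [← hsplit]; simp
        rw [hlrev]
        exact tw_append_of_exists _ hmem
      have h2 : List.takeWhile (fun c => c == 'a') (List.dropWhile (fun c => c == 'a') l).reverse = List.replicate (ra) 'a' := by
        rw [takeWhile_a_replicate]
        congr 1
        rw [← htwrev, hraw]
      have hdeq : (List.dropWhile (fun c => c == 'a') l) = (List.dropWhile (fun c => c == 'a') (List.dropWhile (fun c => c == 'a') l).reverse).reverse ++ List.replicate (ra) 'a' := by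
        calc (List.dropWhile (fun c => c == 'a') l) = (List.dropWhile (fun c => c == 'a') l).reverse.reverse := by simp
          _ = (List.takeWhile (fun c => c == 'a') (List.dropWhile (fun c => c == 'a') l).reverse
                ++ List.dropWhile (fun c => c == 'a') (List.dropWhile (fun c => c == 'a') l).reverse).reverse := by
              rw [List.takeWhile_append_dropWhile]
          _ = (List.dropWhile (fun c => c == 'a') (List.dropWhile (fun c => c == 'a') l).reverse).reverse ++ (List.takeWhile (fun c => c == 'a') (List.dropWhile (fun c => c == 'a') l).reverse).reverse := by
              rw [List.reverse_append]
          _ = (List.dropWhile (fun c => c == 'a') (List.dropWhile (fun c => c == 'a') l).reverse).reverse ++ List.replicate (ra) 'a' := by rw [h2]; simp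
      have htwrep : List.takeWhile (fun c => c == 'a') l = List.replicate (la) 'a' := by
        rw [takeWhile_a_replicate]
        congr 1
        rw [hla]
      have hteq : List.replicate (ra - la) 'a' ++ l
          = List.replicate (ra) 'a' ++ (List.dropWhile (fun c => c == 'a') (List.dropWhile (fun c => c == 'a') l).reverse).reverse ++ List.replicate (ra) 'a' := by
        conv_lhs => rw [← hsplit, htwrep, hdeq]
        rw [← List.append_assoc, ← List.append_assoc, ← List.replicate_add]
        have hral : ra - la + la = ra := by omega
        rw [hral, List.append_assoc]
      rw [palChk_eq_if]
      simp only [hteq]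
      have hrev : (List.replicate (ra) 'a' ++ (List.dropWhile (fun c => c == 'a') (List.dropWhile (fun c => c == 'a') l).reverse).reverse ++ List.replicate (ra) 'a').reverse
          = List.replicate (ra) 'a' ++ (List.dropWhile (fun c => c == 'a') (List.dropWhile (fun c => c == 'a') l).reverse).reverse.reverse ++ List.replicate (ra) 'a' := by
        simp [List.reverse_append, List.append_assoc]
      have hcond : (List.replicate (ra) 'a' ++ (List.dropWhile (fun c => c == 'a') (List.dropWhile (fun c => c == 'a') l).reverse).reverse ++ List.replicate (ra) 'a'
          = (List.replicate (ra) 'a' ++ (List.dropWhile (fun c => c == 'a') (List.dropWhile (fun c => c == 'a') l).reverse).reverse ++ List.replicate (ra) 'a').reverse)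
          ↔ (List.dropWhile (fun c => c == 'a') (List.dropWhile (fun c => c == 'a') l).reverse).reverse = (List.dropWhile (fun c => c == 'a') (List.dropWhile (fun c => c == 'a') l).reverse).reverse.reverse := by
        rw [hrev]
        constructor
        · intro h
          have h' : List.replicate (ra) 'a' ++ ((List.dropWhile (fun c => c == 'a') (List.dropWhile (fun c => c == 'a') l).reverse).reverse ++ List.replicate (ra) 'a')
              = List.replicate (ra) 'a' ++ ((List.dropWhile (fun c => c == 'a') (List.dropWhile (fun c => c == 'a') l).reverse).reverse.reverse ++ List.replicate (ra) 'a') := by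
            simpa [List.append_assoc] using h
          exact List.append_cancel_right (List.append_cancel_left h')
        · intro h
          rw [List.append_assoc, List.append_assoc, ← h]
      simp only [hcond]

-- ===== VERDICT (by name: the statement is the Claim_ definition above) =====
theorem solve_spec : Claim_equal_solve := by
  intro s _
  unfold Spec_solve
  exact solve_eq s
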